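-- pv_equiv track=rewrite | github.com/Topology-Litihum/package_band_Litihum | band_lithium/core.py | remove_cell_parameters
-- ===== SOURCE A (Python) =====
-- def remove_cell_parameters(lines):
--     cleaned_lines = []
--     skip_lines = False
--     for line in lines:
--         if 'CELL_PARAMETERS angstrom' in line:
--             skip_lines = True
--             continue
--         if skip_lines and line.strip() == '':
--             skip_lines = False
--             continue
--         if not skip_lines:
--             cleaned_lines.append(line)
--     return cleaned_lines
-- ===== SOURCE B (Python) =====
-- def remove_cell_parameters(lines):
--     cleaned_lines = []
--     it = iter(lines)
--     for line in it:
--         if 'CELL_PARAMETERS angstrom' in line: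
--             for inner in it:
--                 if inner.strip() == '':
--                     break
--             continue
--         cleaned_lines.append(line)
--     return cleaned_lines
-- ===== Notes on version B (the rewrite author's own statement) =====
-- stated objective: idiomatic
-- what changed: Replaces the boolean skip flag threaded through one loop with an explicit iterator consumed by a nested inner loop that swallows the CELL_PARAMETERS block up to its terminating blank line.
import Mathlib
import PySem

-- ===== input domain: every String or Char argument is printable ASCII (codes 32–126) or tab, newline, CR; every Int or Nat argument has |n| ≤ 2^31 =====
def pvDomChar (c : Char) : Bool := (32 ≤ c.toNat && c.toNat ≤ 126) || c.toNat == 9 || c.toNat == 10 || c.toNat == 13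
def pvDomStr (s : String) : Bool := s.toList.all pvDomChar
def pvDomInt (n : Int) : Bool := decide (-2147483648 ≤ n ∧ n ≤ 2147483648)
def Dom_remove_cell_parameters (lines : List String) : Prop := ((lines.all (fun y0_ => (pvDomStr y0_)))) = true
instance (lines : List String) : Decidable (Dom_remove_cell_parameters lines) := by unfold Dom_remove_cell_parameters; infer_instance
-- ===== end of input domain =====

-- B replaces A's boolean skip flag with an explicit iterator consumed by a nested inner loop (idiomatic decomposition; return value only).


-- ===== PORT A =====
-- the body of A's for-loop on state (cleaned_lines, skip_lines), branch for branch
def aStep (st : List String × Bool) (line : String) : List String × Bool :=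
  if PySem.Str.isIn "CELL_PARAMETERS angstrom" line then (st.1, true)
  else if st.2 && (PySem.Str.strip line == "") then (st.1, false)
  else if !st.2 then (st.1 ++ [line], st.2)
  else st

def remove_cell_parameters (lines : List String) : List String :=
  (lines.foldl aStep ([], false)).1

-- ===== PORT B =====
-- B's outer loop over the iterator (bOuter) keeps normal lines; on a header line the
-- inner loop (bSkip) consumes the rest of the iterator up to the first blank line.
mutual
  def bOuter : List String → List String
    | [] => []
    | line :: rest =>
      if PySem.Str.isIn "CELL_PARAMETERS angstrom" line then bSkip rest
      else line :: bOuter rest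
  def bSkip : List String → List String
    | [] => []
    | inner :: rest =>
      if PySem.Str.strip inner == "" then bOuter rest
      else bSkip rest
end

def remove_cell_parameters_alt (lines : List String) : List String := bOuter lines

-- ===== PRECONDITION & SPEC =====
def Spec_remove_cell_parameters (lines : List String) (out : List String) : Prop := out = remove_cell_parameters_alt lines
instance (lines : List String) (out : List String) : Decidable (Spec_remove_cell_parameters lines out) := by unfold Spec_remove_cell_parameters; infer_instance

-- ===== CLAIM (what is proved, stated in full; the proofs are below) =====
def Claim_equal_remove_cell_parameters : Prop := ∀ (lines : List String), Dom_remove_cell_parameters lines → Spec_remove_cell_parameters lines (remove_cell_parameters lines)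

-- ===== LEMMAS AND PROOFS =====

-- a line containing the header substring contains 'C', so it cannot strip to ""
theorem header_not_blank (line : String)
    (h : PySem.Str.isIn "CELL_PARAMETERS angstrom" line = true) :
    (PySem.Str.strip line == "") = false := by
  rw [Bool.eq_false_iff]
  intro hb
  have hb' : PySem.Chars.strip line.toList = [] := by
    have : PySem.Str.strip line = "" := by exact_mod_cast eq_of_beq hb
    have := congrArg String.toList this
    rwa [PySem.Str.toList_strip] at this
  -- strip = [] means every character is whitespace
  have hls : ∀ c ∈ PySem.Chars.lstrip line.toList, PySem.Chars.isspace c = true := by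
    have hr : List.dropWhile PySem.Chars.isspace
        (PySem.Chars.lstrip line.toList).reverse = [] := by
      have := hb'
      unfold PySem.Chars.strip PySem.Chars.rstrip at this
      simpa [List.reverse_eq_nil_iff] using this
    intro c hc
    exact List.dropWhile_eq_nil_iff.mp hr c (List.mem_reverse.mpr hc)
  have hall : ∀ c ∈ line.toList, PySem.Chars.isspace c = true := by
    intro c hc
    rcases List.mem_append.mp
        ((List.takeWhile_append_dropWhile (p := PySem.Chars.isspace)
          (l := line.toList)) ▸ hc) with h1 | h2
    · exact List.mem_takeWhile_imp h1
    · exact hls c h2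
  have hinf : ("CELL_PARAMETERS angstrom".toList) <:+: line.toList :=
    (PySem.Str.isIn_iff_infix _ _).mp h
  have hC : 'C' ∈ line.toList := hinf.subset (by decide)
  have := hall 'C' hC
  simp [PySem.Chars.isspace] at this

-- invariant: A's fold from (acc, skip) produces acc ++ (bOuter / bSkip) of the rest
theorem foldl_aStep_eq (lines : List String) : ∀ (acc : List String) (skip : Bool),
    (lines.foldl aStep (acc, skip)).1 = acc ++ (if skip then bSkip lines else bOuter lines) := by
  induction lines with
  | nil => intro acc skip; cases skip <;> simp [bOuter, bSkip]
  | cons line rest ih =>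
    intro acc skip
    simp only [List.foldl_cons]
    by_cases h1 : PySem.Str.isIn "CELL_PARAMETERS angstrom" line = true
    · have hs : aStep (acc, skip) line = (acc, true) := by
        simp only [aStep]; rw [if_pos h1]
      rw [hs, ih acc true]
      cases skip
      · rw [show bOuter (line :: rest) = bSkip rest by rw [bOuter, if_pos h1]]
        simp
      · rw [show bSkip (line :: rest) = bSkip rest by
          rw [bSkip, if_neg (by simp [header_not_blank line h1])]]
        simp
    · cases skip
      · have hs : aStep (acc, false) line = (acc ++ [line], false) := by
          simp only [aStep]; rw [if_neg h1]; simp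
        rw [hs, ih (acc ++ [line]) false]
        rw [show bOuter (line :: rest) = line :: bOuter rest by rw [bOuter, if_neg h1]]
        simp
      · by_cases h2 : (PySem.Str.strip line == "") = true
        · have hs : aStep (acc, true) line = (acc, false) := by
            simp only [aStep]; rw [if_neg h1]; simp [h2]
          rw [hs, ih acc false]
          rw [show bSkip (line :: rest) = bOuter rest by rw [bSkip, if_pos h2]]
          simp
        · have hs : aStep (acc, true) line = (acc, true) := by
            simp only [aStep]; rw [if_neg h1]; simp [h2]
          rw [hs, ih acc true]
          rw [show bSkip (line :: rest) = bSkip rest by rw [bSkip, if_neg h2]]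
          simp

-- ===== VERDICT (by name: the statement is the Claim_ definition above) =====
theorem remove_cell_parameters_spec : Claim_equal_remove_cell_parameters := by
  intro lines _
  show remove_cell_parameters lines = remove_cell_parameters_alt lines
  rw [remove_cell_parameters, foldl_aStep_eq lines [] false]
  simp [remove_cell_parameters_alt]
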